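-- pv_equiv track=rewrite | github.com/bezverec/valid2000 | jp2.py | _tileparts_per_tile_tpsot_complete
-- ===== SOURCE A (Python) =====
-- from typing import Any, Dict, List, Optional, Tuple, Union, Iterable
--
-- def _safe_int_list(x: Any) -> Optional[List[int]]:
--     if not isinstance(x, list):
--         return None
--     if not all(isinstance(i, int) for i in x):
--         return None
--     return x
--
-- def _tileparts_per_tile_tpsot_complete(num_tiles: Optional[int], isot: Any, tpsot: Any, tnsot: Any) -> bool:
--     if not (isinstance(num_tiles, int) and num_tiles > 0):
--         return False
--     isot_l = _safe_int_list(isot)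
--     tpsot_l = _safe_int_list(tpsot)
--     tnsot_l = _safe_int_list(tnsot)
--     if isot_l is None or tpsot_l is None or tnsot_l is None:
--         return False
--     if not (len(isot_l) == len(tpsot_l) == len(tnsot_l) and len(isot_l) > 0):
--         return False
--
--     tnsot_set = set(tnsot_l)
--     if len(tnsot_set) != 1:
--         return False
--     parts_per_tile = next(iter(tnsot_set))
--     if parts_per_tile < 1:
--         return False
--
--     by_tile: Dict[int, set] = {t: set() for t in range(num_tiles)}
--     for ti, pi in zip(isot_l, tpsot_l):
--         if not isinstance(ti, int) or not isinstance(pi, int):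
--             return False
--         if ti not in by_tile:
--             return False
--         by_tile[ti].add(pi)
--
--     expect = set(range(parts_per_tile))
--     return all(by_tile[t] == expect for t in range(num_tiles))
-- ===== SOURCE B (Python) =====
-- def _tileparts_per_tile_tpsot_complete(num_tiles, isot, tpsot, tnsot):
--     if not (isinstance(num_tiles, int) and num_tiles > 0):
--         return False
--     if not (isinstance(isot, list) and isinstance(tpsot, list) and isinstance(tnsot, list)):
--         return False
--     if not all(isinstance(v, int) for l in (isot, tpsot, tnsot) for v in l):
--         return False
--     if not (len(isot) == len(tpsot) == len(tnsot) and len(isot) > 0):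
--         return False
--     parts_per_tile = tnsot[0]
--     if parts_per_tile < 1:
--         return False
--     if any(v != parts_per_tile for v in tnsot):
--         return False
--     seen = set()
--     for ti, pi in zip(isot, tpsot):
--         if not (0 <= ti < num_tiles and 0 <= pi < parts_per_tile):
--             return False
--         seen.add((ti, pi))
--     return len(seen) == num_tiles * parts_per_tile
-- ===== Notes on version B (the rewrite author's own statement) =====
-- stated objective: alternative
-- what changed: Replaced the per-tile dict-of-sets and per-tile comparison against set(range(parts)) by inline range validation of each (tile, part) pair plus a single flat set whose cardinality is compared to num_tiles*parts_per_tile (pigeonhole on the complete grid); the singleton-set test on tnsot becomes an all-equal-to-first check.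
import Mathlib
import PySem

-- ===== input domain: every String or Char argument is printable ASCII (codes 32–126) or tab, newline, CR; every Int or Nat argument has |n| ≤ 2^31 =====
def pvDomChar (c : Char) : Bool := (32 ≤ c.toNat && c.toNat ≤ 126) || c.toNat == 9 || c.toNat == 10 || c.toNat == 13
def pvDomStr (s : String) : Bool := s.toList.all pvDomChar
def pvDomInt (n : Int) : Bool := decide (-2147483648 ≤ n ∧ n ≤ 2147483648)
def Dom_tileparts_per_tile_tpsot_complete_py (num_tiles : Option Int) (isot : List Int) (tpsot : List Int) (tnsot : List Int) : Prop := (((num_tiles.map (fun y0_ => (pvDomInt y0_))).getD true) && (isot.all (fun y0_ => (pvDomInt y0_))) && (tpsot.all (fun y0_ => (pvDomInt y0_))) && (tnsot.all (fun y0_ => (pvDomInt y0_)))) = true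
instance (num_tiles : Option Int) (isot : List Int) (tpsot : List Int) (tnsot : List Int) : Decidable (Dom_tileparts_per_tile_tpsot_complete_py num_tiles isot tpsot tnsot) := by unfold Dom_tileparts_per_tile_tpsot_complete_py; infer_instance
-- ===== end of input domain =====

-- B replaces A's per-tile dict of sets (each compared to set(range(parts))) by inline range
-- checks plus one flat set of (tile, part) pairs whose cardinality is compared to
-- num_tiles * parts_per_tile (a pigeonhole argument on the complete grid); same return value.

-- ===== PORT A =====
-- by_tile = {t: set() for t in range(num_tiles)}
def pvA_init (n : Int) : PySem.Dict Int (PySem.Set Int) :=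
  (PySem.List.pyRange 0 n 1).foldl (fun d t => d.insert t PySem.Set.empty) PySem.Dict.empty

-- the 'for ti, pi in zip(isot_l, tpsot_l)' loop; none = the early 'return False'
-- (the isinstance checks inside the loop are always true for typed Int lists)
def pvA_loop : List (Int × Int) → PySem.Dict Int (PySem.Set Int) → Option (PySem.Dict Int (PySem.Set Int))
  | [], d => some d
  | (ti, pi) :: rest, d =>
    if d.contains ti then
      pvA_loop rest (d.modify ti PySem.Set.empty (fun s => PySem.Set.add s pi))
    else none

def tileparts_per_tile_tpsot_complete_py (num_tiles : Option Int) (isot : List Int) (tpsot : List Int) (tnsot : List Int) : Bool :=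
  match num_tiles with
  | none => false
  | some n =>
    -- _safe_int_list always returns its argument on typed List Int inputs
    if n ≤ 0 then false
    else if ¬ (isot.length = tpsot.length ∧ tpsot.length = tnsot.length ∧ 0 < isot.length) then false
    else
      -- tnsot_set = set(tnsot_l); parts_per_tile = next(iter(tnsot_set)) is, on a
      -- singleton set, its unique element (hash order irrelevant) = its head
      if PySem.Set.len (PySem.Set.ofList tnsot) ≠ 1 then false
      else if (PySem.Set.ofList tnsot).headD 0 < 1 then false
      else
        match pvA_loop (isot.zip tpsot) (pvA_init n) with
        | none => false
        | some by_tile =>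
          -- expect = set(range(parts_per_tile))
          (PySem.List.pyRange 0 n 1).all
            (fun t => PySem.Set.equal (by_tile.getD t PySem.Set.empty)
              (PySem.Set.ofList (PySem.List.pyRange 0 ((PySem.Set.ofList tnsot).headD 0) 1)))

-- ===== PORT B =====
-- B's loop: validate both ranges, accumulate the flat set of pairs; none = early return False
def pvB_loop (n p : Int) : List (Int × Int) → PySem.Set (Int × Int) → Option (PySem.Set (Int × Int))
  | [], seen => some seen
  | (ti, pi) :: rest, seen =>
    if 0 ≤ ti ∧ ti < n ∧ 0 ≤ pi ∧ pi < p then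
      pvB_loop n p rest (PySem.Set.add seen (ti, pi))
    else none

def tileparts_per_tile_tpsot_complete_py_alt (num_tiles : Option Int) (isot : List Int) (tpsot : List Int) (tnsot : List Int) : Bool :=
  match num_tiles with
  | none => false
  | some n =>
    if n ≤ 0 then false
    else if ¬ (isot.length = tpsot.length ∧ tpsot.length = tnsot.length ∧ 0 < isot.length) then false
    else
      -- p = tnsot[0]
      if tnsot.headD 0 < 1 then false
      else if tnsot.any (fun v => v ≠ tnsot.headD 0) then false
      else
        match pvB_loop n (tnsot.headD 0) (isot.zip tpsot) PySem.Set.empty with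
        | none => false
        | some seen => decide ((seen.length : Int) = n * (tnsot.headD 0))

-- ===== PRECONDITION & SPEC =====
def Spec_tileparts_per_tile_tpsot_complete_py (num_tiles : Option Int) (isot : List Int) (tpsot : List Int) (tnsot : List Int) (out : Bool) : Prop := out = tileparts_per_tile_tpsot_complete_py_alt num_tiles isot tpsot tnsot
instance (num_tiles : Option Int) (isot : List Int) (tpsot : List Int) (tnsot : List Int) (out : Bool) : Decidable (Spec_tileparts_per_tile_tpsot_complete_py num_tiles isot tpsot tnsot out) := by unfold Spec_tileparts_per_tile_tpsot_complete_py; infer_instance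

-- ===== CLAIM (what is proved, stated in full; the proofs are below) =====
def Claim_equal_tileparts_per_tile_tpsot_complete_py : Prop := ∀ (num_tiles : Option Int) (isot : List Int) (tpsot : List Int) (tnsot : List Int), Dom_tileparts_per_tile_tpsot_complete_py num_tiles isot tpsot tnsot → Spec_tileparts_per_tile_tpsot_complete_py num_tiles isot tpsot tnsot (tileparts_per_tile_tpsot_complete_py num_tiles isot tpsot tnsot)

-- ===== LEMMAS AND PROOFS =====

lemma pv_foldl_insert_getD (l : List Int) (d : PySem.Dict Int (PySem.Set Int))
    (hd : ∀ t, d.getD t PySem.Set.empty = PySem.Set.empty) (t : Int) :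
    (l.foldl (fun d t => d.insert t PySem.Set.empty) d).getD t PySem.Set.empty = PySem.Set.empty := by
  induction l generalizing d with
  | nil => exact hd t
  | cons x xs ih =>
    simp only [List.foldl_cons]
    refine ih _ (fun t' => ?_)
    rw [PySem.Dict.getD_insert]
    split
    · rfl
    · exact hd t'

lemma pvA_init_getD (n t : Int) : (pvA_init n).getD t PySem.Set.empty = PySem.Set.empty := by
  exact pv_foldl_insert_getD _ _ (fun t' => by simp [PySem.Dict.getD_empty]) t

lemma pvA_init_contains (n t : Int) :
    (pvA_init n).contains t = true ↔ 0 ≤ t ∧ t < n := by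
  unfold pvA_init
  rw [PySem.Dict.contains_iff_mem_keys, PySem.Dict.keys_foldl_insert]
  simp [PySem.Dict.keys_empty, PySem.Set.update_nil_left, PySem.Set.mem_ofList,
    PySem.List.mem_pyRange_one]

lemma pvA_loop_isSome (pairs : List (Int × Int)) (d : PySem.Dict Int (PySem.Set Int)) :
    (pvA_loop pairs d).isSome = true ↔ ∀ x ∈ pairs, d.contains x.1 = true := by
  induction pairs generalizing d with
  | nil => simp [pvA_loop]
  | cons x xs ih =>
    obtain ⟨ti, pi⟩ := x
    by_cases hc : d.contains ti = true
    · rw [pvA_loop, if_pos hc, ih]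
      constructor
      · intro hall y hy
        rcases List.mem_cons.mp hy with h1 | h1
        · simpa [h1] using hc
        · have := hall y h1
          rw [PySem.Dict.contains_modify] at this
          rcases Bool.or_eq_true_iff.mp this with h2 | h2
          · rw [show y.1 = ti from by simpa using h2]; exact hc
          · exact h2
      · intro hall y hy
        rw [PySem.Dict.contains_modify]
        exact Bool.or_eq_true_iff.mpr (Or.inr (hall y (List.mem_cons_of_mem _ hy)))
    · rw [pvA_loop, if_neg hc]
      simp only [Option.isSome_none, Bool.false_eq_true, false_iff]
      intro hall
      exact hc (hall (ti, pi) (List.mem_cons_self ..))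

lemma pvA_loop_getD_mem (pairs : List (Int × Int)) (d d' : PySem.Dict Int (PySem.Set Int))
    (h : pvA_loop pairs d = some d') (t q : Int) :
    q ∈ d'.getD t PySem.Set.empty ↔ q ∈ d.getD t PySem.Set.empty ∨ (t, q) ∈ pairs := by
  induction pairs generalizing d with
  | nil =>
    simp only [pvA_loop, Option.some_inj] at h
    simp [h]
  | cons x xs ih =>
    obtain ⟨ti, pi⟩ := x
    by_cases hc : d.contains ti = true
    · rw [pvA_loop, if_pos hc] at h
      rw [ih _ h]
      rw [PySem.Dict.getD_modify]
      by_cases ht : t = ti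
      · subst ht
        simp only [reduceIte, PySem.Set.mem_add, List.mem_cons, Prod.mk.injEq, true_and]
        tauto
      · simp only [if_neg ht, List.mem_cons, Prod.mk.injEq]
        tauto
    · rw [pvA_loop, if_neg hc] at h
      exact absurd h (by simp)

lemma pvB_loop_eq_some (n p : Int) (pairs : List (Int × Int)) (s : PySem.Set (Int × Int))
    (h : ∀ x ∈ pairs, 0 ≤ x.1 ∧ x.1 < n ∧ 0 ≤ x.2 ∧ x.2 < p) :
    pvB_loop n p pairs s = some (PySem.Set.update s pairs) := by
  induction pairs generalizing s with
  | nil => simp [pvB_loop, PySem.Set.update_nil]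
  | cons x xs ih =>
    obtain ⟨ti, pi⟩ := x
    rw [pvB_loop, if_pos (h (ti, pi) (List.mem_cons_self ..)),
      ih _ (fun y hy => h y (List.mem_cons_of_mem _ hy)), PySem.Set.update_cons]

lemma pvB_loop_eq_none (n p : Int) (pairs : List (Int × Int)) (s : PySem.Set (Int × Int))
    (h : ¬ ∀ x ∈ pairs, 0 ≤ x.1 ∧ x.1 < n ∧ 0 ≤ x.2 ∧ x.2 < p) :
    pvB_loop n p pairs s = none := by
  induction pairs generalizing s with
  | nil => exact absurd (by simp) h
  | cons x xs ih =>
    obtain ⟨ti, pi⟩ := x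
    by_cases hx : 0 ≤ ti ∧ ti < n ∧ 0 ≤ pi ∧ pi < p
    · rw [pvB_loop, if_pos hx]
      refine ih _ (fun hall => h ?_)
      intro y hy
      rcases List.mem_cons.mp hy with h1 | h1
      · simpa [h1] using hx
      · exact hall y h1
    · rw [pvB_loop, if_neg hx]

lemma pv_card_iff (n p : Int) (hn : 0 < n) (hp : 1 ≤ p) (pairs : List (Int × Int))
    (h : ∀ x ∈ pairs, 0 ≤ x.1 ∧ x.1 < n ∧ 0 ≤ x.2 ∧ x.2 < p) :
    (((PySem.Set.ofList pairs).length : Int) = n * p) ↔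
      ∀ t, 0 ≤ t → t < n → ∀ q, ((t, q) ∈ pairs ↔ 0 ≤ q ∧ q < p) := by
  classical
  set S := PySem.Set.ofList pairs with hS
  have hnodup : S.Nodup := by rw [hS]; exact PySem.Set.nodup_ofList pairs
  have hmem : ∀ x, x ∈ S ↔ x ∈ pairs := by rw [hS]; exact PySem.Set.mem_ofList pairs
  have hcard : S.toFinset.card = S.length := List.toFinset_card_of_nodup hnodup
  set G : Finset (Int × Int) := Finset.Ico 0 n ×ˢ Finset.Ico 0 p with hG
  have hGmem : ∀ x : Int × Int, x ∈ G ↔ (0 ≤ x.1 ∧ x.1 < n) ∧ (0 ≤ x.2 ∧ x.2 < p) := by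
    intro x; simp [hG, Finset.mem_product]
  have hGcard : (G.card : Int) = n * p := by
    have h1 : (Finset.Ico (0:Int) n).card = n.toNat := by simp
    have h2 : (Finset.Ico (0:Int) p).card = p.toNat := by simp
    rw [hG, Finset.card_product, h1, h2]
    push_cast
    rw [Int.toNat_of_nonneg (by omega), Int.toNat_of_nonneg (by omega)]
  have hsub : S.toFinset ⊆ G := by
    intro x hx
    rw [List.mem_toFinset, hmem] at hx
    exact (hGmem x).mpr ⟨⟨(h x hx).1, (h x hx).2.1⟩, (h x hx).2.2⟩
  constructor
  · intro hlen t ht1 ht2 q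
    have hceq : S.toFinset.card = G.card := by omega
    have heq : S.toFinset = G := Finset.eq_of_subset_of_card_le hsub (le_of_eq hceq.symm)
    constructor
    · intro hq; exact (h (t, q) hq).2.2
    · intro hq
      have : (t, q) ∈ G := (hGmem _).mpr ⟨⟨ht1, ht2⟩, hq⟩
      rw [← heq, List.mem_toFinset, hmem] at this
      exact this
  · intro hcov
    have heq : S.toFinset = G := by
      apply Finset.ext
      intro x
      rw [List.mem_toFinset, hmem, hGmem]
      obtain ⟨a, b⟩ := x
      constructor
      · intro hx; exact ⟨⟨(h _ hx).1, (h _ hx).2.1⟩, (h _ hx).2.2⟩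
      · intro hx
        exact (hcov a hx.1.1 hx.1.2 b).mpr hx.2
    have : (S.toFinset.card : Int) = n * p := by rw [heq]; exact hGcard
    omega


-- tnsot with every element equal to its head: set(tnsot) is the singleton
lemma pv_ofList_singleton (v : Int) (rest : List Int) (hall : ∀ x ∈ rest, x = v) :
    PySem.Set.ofList (v :: rest) = [v] := by
  rw [PySem.Set.ofList_cons]
  have h0 : PySem.Set.discard (PySem.Set.ofList rest) v = [] := by
    rw [List.eq_nil_iff_forall_not_mem]
    intro x hx
    rw [PySem.Set.mem_discard] at hx
    exact hx.2 (hall x ((PySem.Set.mem_ofList rest x).mp hx.1))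
  rw [h0]

-- tnsot with some element different from its head: set(tnsot) is not a singleton
lemma pv_ofList_len_ne_one (v : Int) (rest : List Int) (x : Int) (hx : x ∈ rest) (hne : x ≠ v) :
    (PySem.Set.ofList (v :: rest)).length ≠ 1 := by
  intro h1
  rw [PySem.Set.ofList_cons, List.length_cons] at h1
  have h0 : PySem.Set.discard (PySem.Set.ofList rest) v = [] :=
    List.length_eq_zero_iff.mp (by omega)
  have hmem : x ∈ PySem.Set.discard (PySem.Set.ofList rest) v := by
    rw [PySem.Set.mem_discard]
    exact ⟨(PySem.Set.mem_ofList rest x).mpr hx, hne⟩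
  rw [h0] at hmem
  exact absurd hmem (List.not_mem_nil)

-- the two loop-plus-final computations agree
lemma pv_main (n p : Int) (hn : 0 < n) (hp : 1 ≤ p) (pairs : List (Int × Int)) :
    (match pvA_loop pairs (pvA_init n) with
     | none => false
     | some by_tile => (PySem.List.pyRange 0 n 1).all
         (fun t => PySem.Set.equal (by_tile.getD t PySem.Set.empty)
           (PySem.Set.ofList (PySem.List.pyRange 0 p 1))))
    = (match pvB_loop n p pairs PySem.Set.empty with
       | none => false
       | some seen => decide ((seen.length : Int) = n * p)) := by
  by_cases hti : ∀ x ∈ pairs, 0 ≤ x.1 ∧ x.1 < n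
  · have hsome : (pvA_loop pairs (pvA_init n)).isSome = true :=
      (pvA_loop_isSome pairs _).mpr (fun x hx => (pvA_init_contains n x.1).mpr (hti x hx))
    obtain ⟨d, hd⟩ := Option.isSome_iff_exists.mp hsome
    rw [hd]
    have hdm : ∀ t q : Int, q ∈ d.getD t PySem.Set.empty ↔ (t, q) ∈ pairs := by
      intro t q
      rw [pvA_loop_getD_mem pairs _ d hd t q, pvA_init_getD]
      simp [PySem.Set.empty]
    by_cases hpi : ∀ x ∈ pairs, 0 ≤ x.2 ∧ x.2 < p
    · have hfull : ∀ x ∈ pairs, 0 ≤ x.1 ∧ x.1 < n ∧ 0 ≤ x.2 ∧ x.2 < p :=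
        fun x hx => ⟨(hti x hx).1, (hti x hx).2, (hpi x hx).1, (hpi x hx).2⟩
      rw [pvB_loop_eq_some n p pairs _ hfull]
      show ((PySem.List.pyRange 0 n 1).all
          (fun t => PySem.Set.equal (d.getD t PySem.Set.empty)
            (PySem.Set.ofList (PySem.List.pyRange 0 p 1))))
        = decide (((PySem.Set.update (PySem.Set.empty : PySem.Set (Int × Int)) pairs).length : Int) = n * p)
      rw [show PySem.Set.update (PySem.Set.empty : PySem.Set (Int × Int)) pairs
            = PySem.Set.ofList pairs from PySem.Set.update_nil_left pairs]
      rw [Bool.eq_iff_iff, List.all_eq_true, decide_eq_true_eq]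
      rw [pv_card_iff n p hn hp pairs hfull]
      constructor
      · intro hall t ht1 ht2 q
        have := (PySem.Set.equal_iff _ _).mp (hall t (by rw [PySem.List.mem_pyRange_one]; exact ⟨ht1, ht2⟩)) q
        rw [hdm, PySem.Set.mem_ofList, PySem.List.mem_pyRange_one] at this
        exact this
      · intro hcov t ht
        rw [PySem.List.mem_pyRange_one] at ht
        rw [PySem.Set.equal_iff]
        intro q
        rw [hdm, PySem.Set.mem_ofList, PySem.List.mem_pyRange_one]
        exact hcov t ht.1 ht.2 q
    · rw [pvB_loop_eq_none n p pairs _ (fun hall => hpi (fun x hx => ⟨(hall x hx).2.2.1, (hall x hx).2.2.2⟩))]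
      obtain ⟨x, hximp⟩ := not_forall.mp hpi
      obtain ⟨hx, hxq⟩ := Classical.not_imp.mp hximp
      show ((PySem.List.pyRange 0 n 1).all
          (fun t => PySem.Set.equal (d.getD t PySem.Set.empty)
            (PySem.Set.ofList (PySem.List.pyRange 0 p 1)))) = false
      rw [List.all_eq_false]
      refine ⟨x.1, (PySem.List.mem_pyRange_one).mpr (hti x hx), ?_⟩
      simp only [Bool.not_eq_true]
      rw [Bool.eq_false_iff]
      intro hEq
      have h2 := ((PySem.Set.equal_iff _ _).mp hEq x.2).mp ((hdm x.1 x.2).mpr (by rwa [Prod.mk.eta]))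
      rw [PySem.Set.mem_ofList, PySem.List.mem_pyRange_one] at h2
      exact hxq h2
    
  · rw [pvB_loop_eq_none n p pairs _ (fun hall => hti (fun x hx => ⟨(hall x hx).1, (hall x hx).2.1⟩))]
    have hnone : pvA_loop pairs (pvA_init n) = none := by
      rcases hopt : pvA_loop pairs (pvA_init n) with _ | d
      · rfl
      · exact absurd
          (fun x hx => (pvA_init_contains n x.1).mp
            ((pvA_loop_isSome pairs _).mp (by rw [hopt]; rfl) x hx)) hti
    rw [hnone]

-- ===== VERDICT (by name: the statement is the Claim_ definition above) =====
theorem tileparts_per_tile_tpsot_complete_py_spec : Claim_equal_tileparts_per_tile_tpsot_complete_py := by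
  intro num_tiles isot tpsot tnsot _hdom
  unfold Spec_tileparts_per_tile_tpsot_complete_py
  cases num_tiles with
  | none => rfl
  | some n =>
    simp only [tileparts_per_tile_tpsot_complete_py, tileparts_per_tile_tpsot_complete_py_alt]
    by_cases hn : n ≤ 0
    · rw [if_pos hn, if_pos hn]
    rw [if_neg hn, if_neg hn]
    by_cases hlen : ¬(isot.length = tpsot.length ∧ tpsot.length = tnsot.length ∧ 0 < isot.length)
    · rw [if_pos hlen, if_pos hlen]
    rw [if_neg hlen, if_neg hlen]
    obtain ⟨h1, h2, h3⟩ := not_not.mp hlen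
    cases htn : tnsot with
    | nil => subst htn; simp only [List.length_nil] at h2; omega
    | cons v rest =>
    by_cases hall : ∀ x ∈ rest, x = v
    · have hset : PySem.Set.ofList (v :: rest) = [v] := pv_ofList_singleton v rest hall
      have hany : (v :: rest).any (fun w => decide (w ≠ (v :: rest).headD 0)) = false := by
        simp only [List.headD_cons]
        rw [List.any_eq_false]
        intro x hx
        rcases List.mem_cons.mp hx with h | h
        · simp [h]
        · simp [hall x h]
      rw [hset]
      by_cases hv : v < 1
      · rw [if_neg (by simp [PySem.Set.len]), if_pos (by simpa using hv), if_pos (by simpa using hv)]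
      · rw [if_neg (by simp [PySem.Set.len]), if_neg (by simpa using hv),
          if_neg (by simpa using hv), if_neg (by simp only [hany]; exact Bool.false_ne_true)]
        simp only [List.headD_cons]
        exact pv_main n v (by omega) (by omega) (isot.zip tpsot)
    · obtain ⟨x, hximp⟩ := not_forall.mp hall
      obtain ⟨hx, hne⟩ := Classical.not_imp.mp hximp
      have hA : PySem.Set.len (PySem.Set.ofList (v :: rest)) ≠ 1 := by
        have := pv_ofList_len_ne_one v rest x hx hne
        simpa [PySem.Set.len] using this
      rw [if_pos hA]
      have hany : (v :: rest).any (fun w => decide (w ≠ (v :: rest).headD 0)) = true := by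
        simp only [List.headD_cons]
        rw [List.any_eq_true]
        exact ⟨x, List.mem_cons_of_mem _ hx, by simpa using hne⟩
      by_cases hv : (v :: rest).headD 0 < 1
      · rw [if_pos hv]
      · rw [if_neg hv, if_pos hany]
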